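-- pv_equiv track=rewrite | github.com/andreaantonello/advent_of_code | day22/main.py | generate_secret_number
-- ===== SOURCE A (Python) =====
-- def mix_and_prune(secret_number, value_to_mix):
--     secret_number ^= value_to_mix
--     secret_number %= 16777216
--     return secret_number
--
-- def generate_secret_number(initial_secret, steps=2000):
--     secret_number = initial_secret
--     for _ in range(steps):
--         result = secret_number * 64
--         secret_number = mix_and_prune(secret_number, result)
--
--         result = secret_number // 32
--         secret_number = mix_and_prune(secret_number, result)
--
--
--         # result = secret_number * 2048
--         # result = secret_number * 2048
--
--         result = secret_number * 2048
--         secret_number = mix_and_prune(secret_number, result)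
--
--     return secret_number
-- ===== SOURCE B (Python) =====
-- # Same PRNG result via GF(2) linear algebra: the step is linear over bits, so
-- # represent it by its 24 columns and use binary exponentiation on the map.
--
-- _MASK = 0xFFFFFF
--
--
-- def _step(s):
--     s = (s ^ (s << 6)) & _MASK
--     s = (s ^ (s >> 5)) & _MASK
--     s = (s ^ (s << 11)) & _MASK
--     return s
--
--
-- def _apply(cols, v):
--     r = 0
--     for c in cols:
--         if v & 1:
--             r ^= c
--         v >>= 1
--     return r
--
--
-- def _compose(f, g):
--     return [_apply(f, c) for c in g]
--
--
-- def generate_secret_number(initial_secret, steps=2000):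
--     if steps <= 0:
--         return initial_secret
--     base = [_step(1 << i) for i in range(24)]
--     acc = [1 << i for i in range(24)]
--     n = steps
--     while n:
--         if n & 1:
--             acc = _compose(base, acc)
--         base = _compose(base, base)
--         n >>= 1
--     return _apply(acc, initial_secret % 16777216)
-- ===== Notes on version B (the rewrite author's own statement) =====
-- stated objective: faster
-- what changed: B exploits that one PRNG step is a GF(2)-linear map on 24 bits: it represents the map by its 24 columns, raises it to the power `steps` by binary exponentiation on that representation, and applies it once to the initial secret, instead of iterating the step `steps` times.
import Mathlib
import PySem

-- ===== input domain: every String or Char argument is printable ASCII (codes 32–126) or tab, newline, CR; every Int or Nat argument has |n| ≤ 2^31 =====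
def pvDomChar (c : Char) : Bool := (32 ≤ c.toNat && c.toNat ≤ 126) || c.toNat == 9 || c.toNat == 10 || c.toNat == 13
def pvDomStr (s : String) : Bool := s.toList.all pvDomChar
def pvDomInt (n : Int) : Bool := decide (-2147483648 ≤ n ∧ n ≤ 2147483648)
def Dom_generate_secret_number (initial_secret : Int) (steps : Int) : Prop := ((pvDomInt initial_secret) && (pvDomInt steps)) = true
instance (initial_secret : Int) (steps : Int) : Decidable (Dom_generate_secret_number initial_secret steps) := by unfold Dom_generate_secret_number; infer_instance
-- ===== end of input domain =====

-- B replaces A's step-by-step iteration of the PRNG by GF(2) linear algebra: the step is a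
-- linear map on 24 bits, kept as its 24 columns and raised to the power `steps` by binary
-- exponentiation; proved to return A's value on all inputs.

-- ===== PORT A =====
def mix_and_prune (secret_number : Int) (value_to_mix : Int) : Int :=
  PySem.Int.mod (PySem.Int.bxor secret_number value_to_mix) 16777216

def generate_secret_number (initial_secret : Int) (steps : Int) : Int :=
  (PySem.List.pyRange 0 steps 1).foldl (fun secret_number _ =>
    let r1 := secret_number * 64
    let s1 := mix_and_prune secret_number r1
    let r2 := PySem.Int.floordiv s1 32
    let s2 := mix_and_prune s1 r2
    let r3 := s2 * 2048
    mix_and_prune s2 r3) initial_secret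

-- ===== PORT B =====
def pvStep (s : Int) : Int :=
  let s1 := PySem.Int.band (PySem.Int.bxor s (s <<< (6:Nat))) 16777215
  let s2 := PySem.Int.band (PySem.Int.bxor s1 (s1 >>> (5:Nat))) 16777215
  PySem.Int.band (PySem.Int.bxor s2 (s2 <<< (11:Nat))) 16777215

def pvApply (cols : List Int) (v : Int) : Int :=
  (cols.foldl (fun (rv : Int × Int) c =>
    (if PySem.Int.band rv.2 1 = 1 then PySem.Int.bxor rv.1 c else rv.1, rv.2 >>> (1:Nat)))
    (0, v)).1

def pvCompose (f : List Int) (g : List Int) : List Int :=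
  g.map (fun c => pvApply f c)

-- Python's `while n:` loop; the `n ≤ 0` test is a totality guard (the loop is entered only with n > 0)
def pvPowLoop (base : List Int) (acc : List Int) (n : Int) : List Int :=
  if n ≤ 0 then acc
  else
    pvPowLoop (pvCompose base base)
      (if PySem.Int.band n 1 = 1 then pvCompose base acc else acc) (n >>> (1:Nat))
termination_by n.toNat
decreasing_by
  have := Int.shiftRight_eq_div_pow n 1
  simp at this
  rw [this]; omega

def generate_secret_number_alt (initial_secret : Int) (steps : Int) : Int :=
  if steps ≤ 0 then initial_secret
  else
    let base := (PySem.List.pyRange 0 24 1).map (fun i => pvStep ((1:Int) <<< i.toNat))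
    let acc := (PySem.List.pyRange 0 24 1).map (fun i => ((1:Int) <<< i.toNat))
    pvApply (pvPowLoop base acc steps) (PySem.Int.mod initial_secret 16777216)

-- ===== PRECONDITION & SPEC =====
def Spec_generate_secret_number (initial_secret : Int) (steps : Int) (out : Int) : Prop := out = generate_secret_number_alt initial_secret steps
instance (initial_secret : Int) (steps : Int) (out : Int) : Decidable (Spec_generate_secret_number initial_secret steps out) := by unfold Spec_generate_secret_number; infer_instance

-- ===== CLAIM (what is proved, stated in full; the proofs are below) =====
def Claim_equal_generate_secret_number : Prop := ∀ (initial_secret : Int) (steps : Int), Dom_generate_secret_number initial_secret steps → Spec_generate_secret_number initial_secret steps (generate_secret_number initial_secret steps)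

-- ===== LEMMAS AND PROOFS =====

-- Nat-level model of B's linear algebra
def pvStepN (n : Nat) : Nat :=
  let a := (n ^^^ (n <<< 6)) &&& 16777215
  let b := (a ^^^ (a >>> 5)) &&& 16777215
  (b ^^^ (b <<< 11)) &&& 16777215

def pvApplyN : List Nat → Nat → Nat
  | [], _ => 0
  | c :: cs, v => (if v % 2 = 1 then c else 0) ^^^ pvApplyN cs (v / 2)

def pvComposeN (f : List Nat) (g : List Nat) : List Nat := g.map (pvApplyN f)

def pvPowLoopN (base : List Nat) (acc : List Nat) (n : Nat) : List Nat :=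
  if n = 0 then acc
  else pvPowLoopN (pvComposeN base base) (if n % 2 = 1 then pvComposeN base acc else acc) (n / 2)

-- bitwise facts
theorem pvXorMod (x y k : Nat) : (x ^^^ y) % 2^k = (x % 2^k) ^^^ (y % 2^k) := by
  apply Nat.eq_of_testBit_eq; intro i
  simp [Nat.testBit_mod_two_pow, Nat.testBit_xor, Bool.and_xor_distrib_left]

theorem pvXorShiftL (x y k : Nat) : (x ^^^ y) <<< k = (x <<< k) ^^^ (y <<< k) := by
  apply Nat.eq_of_testBit_eq; intro i
  simp [Nat.testBit_shiftLeft, Nat.testBit_xor, Bool.and_xor_distrib_left]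

theorem pvXorShiftR (x y k : Nat) : (x ^^^ y) >>> k = (x >>> k) ^^^ (y >>> k) := by
  apply Nat.eq_of_testBit_eq; intro i
  simp [Nat.testBit_shiftRight, Nat.testBit_xor]

theorem pvAndMask (x : Nat) : x &&& 16777215 = x % 16777216 := by
  have h : (16777215 : Nat) = 2^24 - 1 := by norm_num
  have h2 : (16777216 : Nat) = 2^24 := by norm_num
  rw [h, h2, Nat.and_two_pow_sub_one_eq_mod]

theorem pvTwoMulXorOne (m : Nat) : 2*m ^^^ 1 = 2*m + 1 := by
  apply Nat.eq_of_testBit_eq; intro i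
  cases i <;> simp [Nat.testBit_succ]

theorem pvCompl (k : Nat) : ∀ w : Nat, w < 2^k → w ^^^ (2^k - 1) = 2^k - 1 - w := by
  induction k with
  | zero => intro w hw; interval_cases w; simp
  | succ k ih =>
    intro w hw
    have hsplit : ∀ z : Nat, z = 2*(z/2) + z%2 := by omega
    have hm : (2^(k+1) - 1) = 2*(2^k - 1) + 1 := by
      have : 0 < 2^k := Nat.two_pow_pos k
      omega
    have hdiv : (w ^^^ (2^(k+1) - 1)) / 2 = w/2 ^^^ (2^k - 1) := by
      have := pvXorShiftR w (2^(k+1) - 1) 1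
      simpa [Nat.shiftRight_succ, Nat.shiftRight_zero, hm, Nat.mul_add_div] using this
    have hmod : (w ^^^ (2^(k+1) - 1)) % 2 = (w % 2) ^^^ 1 := by
      have := pvXorMod w (2^(k+1) - 1) 1
      simpa [hm, Nat.mul_add_mod] using this
    have hw2 : w/2 < 2^k := by
      have : 0 < 2^k := Nat.two_pow_pos k
      omega
    have h1 := ih (w/2) hw2
    have hb : (w % 2) ^^^ 1 = 1 - w % 2 := by
      have : w % 2 = 0 ∨ w % 2 = 1 := by omega
      rcases this with h | h <;> simp [h]
    have := hsplit (w ^^^ (2^(k+1) - 1))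
    rw [hdiv, hmod, h1, hb] at this
    have hp : 0 < 2^k := Nat.two_pow_pos k
    omega

theorem pvMod24 (x y : Nat) : (x ^^^ y) % 16777216 = (x % 16777216) ^^^ (y % 16777216) := by
  have h : (16777216 : Nat) = 2^24 := by norm_num
  rw [h, pvXorMod]

theorem pvCompl24 (w : Nat) (hw : w < 16777216) : w ^^^ 16777215 = 16777215 - w := by
  have h := pvCompl 24 w (by omega)
  norm_num at h
  exact h

theorem pvXorComplR (u v : Nat) : 16777215 - (u ^^^ v) % 16777216 = (u % 16777216) ^^^ (16777215 - v % 16777216) := by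
  have hmodlt : ∀ z : Nat, z % 16777216 < 16777216 := fun z => Nat.mod_lt _ (by norm_num)
  rw [← pvCompl24 _ (hmodlt v), ← pvCompl24 _ (hmodlt (u ^^^ v)), pvMod24, Nat.xor_assoc]

theorem pvXorComplL (u v : Nat) : 16777215 - (u ^^^ v) % 16777216 = (16777215 - u % 16777216) ^^^ (v % 16777216) := by
  have hmodlt : ∀ z : Nat, z % 16777216 < 16777216 := fun z => Nat.mod_lt _ (by norm_num)
  rw [← pvCompl24 _ (hmodlt u), ← pvCompl24 _ (hmodlt (u ^^^ v)), pvMod24,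
    Nat.xor_assoc, Nat.xor_assoc, Nat.xor_comm (v % 16777216)]

theorem pvXorComplLR (u v : Nat) : (u ^^^ v) % 16777216 = (16777215 - u % 16777216) ^^^ (16777215 - v % 16777216) := by
  have hmodlt : ∀ z : Nat, z % 16777216 < 16777216 := fun z => Nat.mod_lt _ (by norm_num)
  rw [← pvCompl24 _ (hmodlt u), ← pvCompl24 _ (hmodlt v), pvMod24,
    Nat.xor_assoc, Nat.xor_comm 16777215, Nat.xor_assoc, Nat.xor_self, Nat.xor_zero]

theorem pvBxorEmod (a b : Int) :
    (PySem.Int.bxor a b) % 16777216 =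
      (((a % 16777216).toNat ^^^ (b % 16777216).toNat : Nat) : Int) := by
  unfold PySem.Int.bxor
  split_ifs with ha hb hb
  · have h1 : (a % 16777216).toNat = a.toNat % 16777216 := by omega
    have h2 : (b % 16777216).toNat = b.toNat % 16777216 := by omega
    have h3 : ((a.toNat ^^^ b.toNat : Nat) : Int) % 16777216
        = (((a.toNat ^^^ b.toNat) % 16777216 : Nat) : Int) := by omega
    rw [h1, h2, h3, pvMod24]
  · have h1 : (a % 16777216).toNat = a.toNat % 16777216 := by omega
    have h2 : (b % 16777216).toNat = 16777215 - (-b-1).toNat % 16777216 := by omega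
    have h3 : ((-(((a.toNat ^^^ (-b-1).toNat : Nat)):Int) - 1) % 16777216)
        = ((16777215 - (a.toNat ^^^ (-b-1).toNat) % 16777216 : Nat) : Int) := by omega
    rw [h1, h2, h3]
    exact_mod_cast congrArg (Nat.cast : Nat → Int) (pvXorComplR a.toNat (-b-1).toNat)
  · have h1 : (a % 16777216).toNat = 16777215 - (-a-1).toNat % 16777216 := by omega
    have h2 : (b % 16777216).toNat = b.toNat % 16777216 := by omega
    have h3 : ((-((((-a-1).toNat ^^^ b.toNat : Nat)):Int) - 1) % 16777216)
        = ((16777215 - ((-a-1).toNat ^^^ b.toNat) % 16777216 : Nat) : Int) := by omega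
    rw [h1, h2, h3]
    exact_mod_cast congrArg (Nat.cast : Nat → Int) (pvXorComplL (-a-1).toNat b.toNat)
  · have h1 : (a % 16777216).toNat = 16777215 - (-a-1).toNat % 16777216 := by omega
    have h2 : (b % 16777216).toNat = 16777215 - (-b-1).toNat % 16777216 := by omega
    have h3 : ((((-a-1).toNat ^^^ (-b-1).toNat : Nat) : Int) % 16777216)
        = ((((-a-1).toNat ^^^ (-b-1).toNat) % 16777216 : Nat) : Int) := by omega
    rw [h1, h2, h3]
    exact_mod_cast congrArg (Nat.cast : Nat → Int) (pvXorComplLR (-a-1).toNat (-b-1).toNat)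

-- A's loop body computes pvStepN of the state reduced mod 2^24
theorem pvMixCast (x y : Nat) :
    mix_and_prune (x : Int) (y : Int) = (((x ^^^ y) % 16777216 : Nat) : Int) := by
  unfold mix_and_prune
  rw [PySem.Int.mod_eq_emod_of_pos (by norm_num), pvBxorEmod]
  have hx : (((x:Int)) % 16777216).toNat = x % 16777216 := by omega
  have hy : (((y:Int)) % 16777216).toNat = y % 16777216 := by omega
  rw [hx, hy, ← pvMod24]

theorem pvStepAeq (s : Int) :
    mix_and_prune
      (mix_and_prune (mix_and_prune s (s * 64))
        (PySem.Int.floordiv (mix_and_prune s (s * 64)) 32))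
      (mix_and_prune (mix_and_prune s (s * 64))
        (PySem.Int.floordiv (mix_and_prune s (s * 64)) 32) * 2048)
    = ((pvStepN ((PySem.Int.mod s 16777216).toNat) : Nat) : Int) := by
  rw [PySem.Int.mod_eq_emod_of_pos (by norm_num)]
  set n : Nat := (s % 16777216).toNat with hn
  have hs : s % 16777216 = (n : Int) := by omega
  have hnlt : n < 16777216 := by omega
  have h64 : (s * 64) % 16777216 = (((n * 64) % 16777216 : Nat) : Int) := by
    rw [Int.mul_emod, hs]
    omega
  have h1 : mix_and_prune s (s * 64) = ((((n ^^^ (n <<< 6)) &&& 16777215 : Nat)) : Int) := by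
    unfold mix_and_prune
    rw [PySem.Int.mod_eq_emod_of_pos (by norm_num), pvBxorEmod, hs, h64]
    rw [pvAndMask, pvMod24, Nat.shiftLeft_eq]
    norm_num
    congr 1 <;> omega
  set a : Nat := (n ^^^ (n <<< 6)) &&& 16777215 with hadef
  have hdiv : PySem.Int.floordiv ((a : Nat) : Int) 32 = (((a >>> 5 : Nat)) : Int) := by
    rw [PySem.Int.floordiv_eq_ediv_of_pos (by norm_num), Nat.shiftRight_eq_div_pow]
    norm_num
  have h2 : mix_and_prune ((a : Nat) : Int) (((a >>> 5 : Nat)) : Int)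
      = ((((a ^^^ (a >>> 5)) &&& 16777215 : Nat)) : Int) := by
    rw [pvAndMask]
    exact pvMixCast a (a >>> 5)
  set b : Nat := (a ^^^ (a >>> 5)) &&& 16777215 with hbdef
  have h3 : mix_and_prune ((b : Nat) : Int) (((b : Nat) : Int) * 2048)
      = ((((b ^^^ (b <<< 11)) &&& 16777215 : Nat)) : Int) := by
    have hc : ((b : Nat) : Int) * 2048 = (((b * 2048 : Nat)) : Int) := by push_cast; ring
    rw [hc, pvMixCast, pvAndMask, Nat.shiftLeft_eq]
  rw [h1, hdiv, h2, h3]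
  simp only [pvStepN]
  rw [hbdef, hadef]

theorem pvStepN_lt (n : Nat) : pvStepN n < 16777216 := by
  simp only [pvStepN, pvAndMask]
  exact Nat.mod_lt _ (by norm_num)

-- pvApplyN is linear and interacts with map/compose
theorem pvApplyN_zero (cs : List Nat) : pvApplyN cs 0 = 0 := by
  induction cs with
  | nil => rfl
  | cons c cs ih => simp [pvApplyN, ih]

theorem pvApplyN_linear (cs : List Nat) : ∀ x y : Nat,
    pvApplyN cs (x ^^^ y) = pvApplyN cs x ^^^ pvApplyN cs y := by
  induction cs with
  | nil => intro x y; simp [pvApplyN]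
  | cons c cs ih =>
    intro x y
    have hm : (x ^^^ y) % 2 = (x % 2) ^^^ (y % 2) := by
      have := pvXorMod x y 1; simpa using this
    have hd : (x ^^^ y) / 2 = (x / 2) ^^^ (y / 2) := by
      have := pvXorShiftR x y 1; simpa [Nat.shiftRight_succ, Nat.shiftRight_zero] using this
    simp only [pvApplyN, hm, hd, ih]
    have hx : x % 2 = 0 ∨ x % 2 = 1 := by omega
    have hy : y % 2 = 0 ∨ y % 2 = 1 := by omega
    rcases hx with hx | hx <;> rcases hy with hy | hy <;>
      simp [hx, hy, Nat.xor_comm, Nat.xor_left_comm]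

theorem pvApplyN_map (f : Nat → Nat) (hf : ∀ x y, f (x ^^^ y) = f x ^^^ f y) (h0 : f 0 = 0)
    (cs : List Nat) : ∀ v : Nat, pvApplyN (cs.map f) v = f (pvApplyN cs v) := by
  induction cs with
  | nil => intro v; simp [pvApplyN, h0]
  | cons c cs ih =>
    intro v
    simp only [List.map_cons, pvApplyN, ih, hf]
    by_cases h : v % 2 = 1 <;> simp [h, h0]

theorem pvApplyN_compose (f g : List Nat) (v : Nat) :
    pvApplyN (pvComposeN f g) v = pvApplyN f (pvApplyN g v) := by
  unfold pvComposeN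
  exact pvApplyN_map (pvApplyN f) (pvApplyN_linear f) (pvApplyN_zero f) g v

theorem pvStepN_linear (x y : Nat) : pvStepN (x ^^^ y) = pvStepN x ^^^ pvStepN y := by
  have stage : ∀ (op : Nat → Nat), (∀ u w, op (u ^^^ w) = op u ^^^ op w) →
      ∀ u w : Nat, ((u ^^^ w) ^^^ op (u ^^^ w)) &&& 16777215
        = ((u ^^^ op u) &&& 16777215) ^^^ ((w ^^^ op w) &&& 16777215) := by
    intro op hop u w
    rw [hop, ← Nat.and_xor_distrib_right]
    congr 1
    simp [Nat.xor_comm, Nat.xor_left_comm]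
  simp only [pvStepN]
  rw [stage (fun t => t <<< 6) (fun u w => pvXorShiftL u w 6) x y,
      stage (fun t => t >>> 5) (fun u w => pvXorShiftR u w 5),
      stage (fun t => t <<< 11) (fun u w => pvXorShiftL u w 11)]

theorem pvStepN_zero : pvStepN 0 = 0 := by decide

-- the identity columns
theorem pvBasis (k : Nat) : ∀ v : Nat,
    pvApplyN ((List.range k).map (fun i => 2^i)) v = v % 2^k := by
  induction k with
  | zero => intro v; simp [pvApplyN, Nat.mod_one]
  | succ k ih =>
    intro v
    rw [List.range_succ_eq_map, List.map_cons, List.map_map]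
    have hmap : (List.range k).map ((fun i => 2^i) ∘ Nat.succ)
        = ((List.range k).map (fun i => 2^i)).map (fun m => 2*m) := by
      rw [List.map_map]
      apply List.map_congr_left
      intro i _
      simp [pow_succ]
      ring
    have hlin : ∀ x y : Nat, 2*(x ^^^ y) = 2*x ^^^ 2*y := by
      intro x y
      have := pvXorShiftL x y 1
      simpa [Nat.shiftLeft_eq, Nat.mul_comm] using this
    rw [hmap]
    simp only [pvApplyN]
    rw [pvApplyN_map (fun m => 2*m) hlin (by simp), ih]
    have hsplit : v % 2^(k+1) = 2*((v/2) % 2^k) + v % 2 := by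
      have h1 := Nat.div_add_mod (v/2) (2^k)
      have h2 : v = 2*(v/2) + v % 2 := by omega
      have hp : (2:Nat)^(k+1) = 2 * 2^k := by ring
      calc v % 2^(k+1) = (2*(v/2) + v % 2) % 2^(k+1) := by rw [← h2]
        _ = (2*(2^k*((v/2)/(2^k)) + (v/2) % 2^k) + v % 2) % 2^(k+1) := by rw [h1]
        _ = ((2*((v/2) % 2^k) + v % 2) + 2^(k+1)*((v/2)/(2^k))) % 2^(k+1) := by ring_nf
        _ = (2*((v/2) % 2^k) + v % 2) % 2^(k+1) := by rw [Nat.add_mul_mod_self_left]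
        _ = 2*((v/2) % 2^k) + v % 2 := by
              apply Nat.mod_eq_of_lt
              have := Nat.mod_lt (v/2) (y := 2^k) (Nat.two_pow_pos k)
              omega
    rw [hsplit]
    by_cases h : v % 2 = 1
    · simp [h]
      rw [Nat.xor_comm]
      exact pvTwoMulXorOne _
    · have h0 : v % 2 = 0 := by omega
      simp [h0]

-- representation invariant and the power loop
def pvRep (cols : List Nat) (m : Nat) : Prop :=
  ∀ v : Nat, v < 16777216 → pvApplyN cols v = pvStepN^[m] v

theorem pvIterLt (m : Nat) : ∀ v : Nat, v < 16777216 → pvStepN^[m] v < 16777216 := by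
  induction m with
  | zero => intro v hv; simpa using hv
  | succ m ih =>
    intro v hv
    rw [Function.iterate_succ_apply]
    exact ih _ (pvStepN_lt v)

theorem pvRep_compose {f g : List Nat} {mf mg : Nat} (hf : pvRep f mf) (hg : pvRep g mg) :
    pvRep (pvComposeN f g) (mf + mg) := by
  intro v hv
  rw [pvApplyN_compose, hg v hv, hf _ (pvIterLt mg v hv), ← Function.iterate_add_apply]

theorem pvRep_powLoop : ∀ n : Nat, ∀ base acc : List Nat, ∀ p q : Nat,
    pvRep base p → pvRep acc q → pvRep (pvPowLoopN base acc n) (q + n * p) := by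
  intro n
  induction n using Nat.strong_induction_on with
  | _ n ih =>
    intro base acc p q hb ha
    by_cases h : n = 0
    · subst h; simpa [pvPowLoopN] using ha
    · rw [pvPowLoopN, if_neg h]
      have hb2 : pvRep (pvComposeN base base) (p + p) := pvRep_compose hb hb
      have hrec := ih (n/2) (by omega) (pvComposeN base base)
      by_cases hpar : n % 2 = 1
      · have ha2 : pvRep (pvComposeN base acc) (p + q) := pvRep_compose hb ha
        have := hrec _ (p+p) (p+q) hb2 ha2
        rw [if_pos hpar]
        obtain ⟨m, hm⟩ : ∃ m, n = 2*m + 1 := ⟨n/2, by omega⟩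
        have hm2 : n/2 = m := by omega
        have harith : (p + q) + (n/2) * (p + p) = q + n * p := by
          rw [hm2, hm]; ring
        rwa [harith] at this
      · have := hrec _ (p+p) q hb2 ha
        rw [if_neg hpar]
        obtain ⟨m, hm⟩ : ∃ m, n = 2*m := ⟨n/2, by omega⟩
        have hm2 : n/2 = m := by omega
        have harith : q + (n/2) * (p + p) = q + n * p := by
          rw [hm2, hm]; ring
        rwa [harith] at this

-- ===== Int/Nat bridges for port B =====
theorem pvCastShiftR (m k : Nat) : ((m : Int) >>> k) = ((m >>> k : Nat) : Int) := by
  simp [Int.shiftRight_eq]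

theorem pvBandOneCast (x : Nat) : PySem.Int.band (x : Int) 1 = ((x &&& 1 : Nat) : Int) := by
  have h : (((1:Nat)) : Int) = (1 : Int) := by norm_num
  rw [← h, PySem.Int.band_natCast]

theorem pvApply_cast (cs : List Nat) : ∀ (r v : Nat),
    ((cs.map (Nat.cast : Nat → Int)).foldl (fun (rv : Int × Int) c =>
      (if PySem.Int.band rv.2 1 = 1 then PySem.Int.bxor rv.1 c else rv.1, rv.2 >>> (1:Nat)))
      ((r : Int), (v : Int))).1 = ((r ^^^ pvApplyN cs v : Nat) : Int) := by
  induction cs with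
  | nil => intro r v; simp [pvApplyN]
  | cons c cs ih =>
    intro r v
    have hband : PySem.Int.band (v : Int) 1 = (((v &&& 1 : Nat)) : Int) := pvBandOneCast v
    have hone : v &&& 1 = v % 2 := Nat.and_one_is_mod v
    have hsh : ((v : Int) >>> (1:Nat)) = (((v / 2 : Nat)) : Int) := by
      rw [pvCastShiftR]
      norm_num [Nat.shiftRight_succ]
    simp only [List.map_cons, List.foldl_cons, hband, hone, hsh]
    by_cases h : v % 2 = 1
    · have hcond : (((v % 2 : Nat)) : Int) = 1 := by rw [h]; rfl
      rw [if_pos hcond]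
      have hx : PySem.Int.bxor ((r : Nat) : Int) ((c : Nat) : Int) = (((r ^^^ c : Nat)) : Int) := by
        norm_num [PySem.Int.bxor_natCast]
      rw [hx, ih]
      simp only [pvApplyN, if_pos h]
      congr 1
      exact Nat.xor_assoc r c _
    · have hcond : ¬ ((((v % 2 : Nat)) : Int) = 1) := by
        have : v % 2 = 0 := by omega
        rw [this]
        norm_num
      rw [if_neg hcond, ih]
      simp [pvApplyN, h]

theorem pvApply_cast' (cs : List Nat) (v : Nat) :
    pvApply (cs.map (Nat.cast : Nat → Int)) (v : Int) = ((pvApplyN cs v : Nat) : Int) := by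
  have := pvApply_cast cs 0 v
  unfold pvApply
  norm_num at this ⊢
  exact this

theorem pvCompose_cast (f g : List Nat) :
    pvCompose (f.map (Nat.cast : Nat → Int)) (g.map (Nat.cast : Nat → Int))
      = (pvComposeN f g).map (Nat.cast : Nat → Int) := by
  unfold pvCompose pvComposeN
  rw [List.map_map, List.map_map]
  apply List.map_congr_left
  intro c _
  exact pvApply_cast' f c

theorem pvPowLoop_cast : ∀ n : Nat, ∀ base acc : List Nat,
    pvPowLoop (base.map (Nat.cast : Nat → Int)) (acc.map (Nat.cast : Nat → Int)) (n : Int)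
      = (pvPowLoopN base acc n).map (Nat.cast : Nat → Int) := by
  intro n
  induction n using Nat.strong_induction_on with
  | _ n ih =>
    intro base acc
    by_cases h : n = 0
    · subst h
      rw [pvPowLoop, pvPowLoopN]
      norm_num
    · rw [pvPowLoop, pvPowLoopN, if_neg h]
      have hn0 : ¬ ((n : Int) ≤ 0) := by omega
      rw [if_neg hn0]
      have hband : PySem.Int.band (n : Int) 1 = (((n &&& 1 : Nat)) : Int) := pvBandOneCast n
      have hone : n &&& 1 = n % 2 := Nat.and_one_is_mod n
      have hsh : ((n : Int) >>> (1:Nat)) = (((n / 2 : Nat)) : Int) := by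
        rw [pvCastShiftR]
        norm_num [Nat.shiftRight_succ]
      rw [hband, hone, hsh, pvCompose_cast]
      by_cases hpar : n % 2 = 1
      · have hcond : (((n % 2 : Nat)) : Int) = 1 := by rw [hpar]; rfl
        rw [if_pos hcond, if_pos hpar, pvCompose_cast]
        exact ih (n/2) (by omega) _ _
      · have hcond : ¬ ((((n % 2 : Nat)) : Int) = 1) := by
          have : n % 2 = 0 := by omega
          rw [this]; norm_num
        rw [if_neg hcond, if_neg hpar]
        exact ih (n/2) (by omega) _ _

-- the concrete starting lists of B are casts of Nat lists
set_option maxRecDepth 8192 in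
theorem pvBaseConcrete :
    (PySem.List.pyRange 0 24 1).map (fun i => pvStep ((1:Int) <<< i.toNat))
      = (((List.range 24).map (fun i => 2^i)).map pvStepN).map (Nat.cast : Nat → Int) := by
  decide

set_option maxRecDepth 8192 in
theorem pvAccConcrete :
    (PySem.List.pyRange 0 24 1).map (fun i => ((1:Int) <<< i.toNat))
      = ((List.range 24).map (fun i => 2^i)).map (Nat.cast : Nat → Int) := by
  decide

theorem pvRep_base : pvRep (((List.range 24).map (fun i => 2^i)).map pvStepN) 1 := by
  intro v hv
  rw [pvApplyN_map pvStepN pvStepN_linear pvStepN_zero, pvBasis]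
  have : v % 2^24 = v := Nat.mod_eq_of_lt (by norm_num at hv ⊢; omega)
  rw [this]
  rfl

theorem pvRep_acc : pvRep ((List.range 24).map (fun i => 2^i)) 0 := by
  intro v hv
  rw [pvBasis]
  have : v % 2^24 = v := Nat.mod_eq_of_lt (by norm_num at hv ⊢; omega)
  rw [this]
  rfl

-- ===== A's loop as iteration =====
theorem pvFoldConst {α β : Type} (f : α → α) : ∀ (l : List β) (x : α),
    l.foldl (fun s _ => f s) x = f^[l.length] x := by
  intro l
  induction l with
  | nil => intro x; rfl
  | cons b l ih =>
    intro x
    simp [List.foldl_cons, ih, Function.iterate_succ_apply]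

theorem pvAstepIter (m : Nat) : ∀ x : Nat, x < 16777216 →
    (fun secret_number : Int =>
      mix_and_prune
        (mix_and_prune (mix_and_prune secret_number (secret_number * 64))
          (PySem.Int.floordiv (mix_and_prune secret_number (secret_number * 64)) 32))
        (mix_and_prune (mix_and_prune secret_number (secret_number * 64))
            (PySem.Int.floordiv (mix_and_prune secret_number (secret_number * 64)) 32) *
          2048))^[m] ((x : Nat) : Int) = ((pvStepN^[m] x : Nat) : Int) := by
  induction m with
  | zero => intro x hx; rfl
  | succ m ih =>
    intro x hx
    rw [Function.iterate_succ_apply, Function.iterate_succ_apply]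
    have hstep := pvStepAeq ((x : Nat) : Int)
    have hmod : (PySem.Int.mod ((x : Nat) : Int) 16777216).toNat = x := by
      rw [PySem.Int.mod_eq_emod_of_pos (by norm_num)]
      omega
    rw [hmod] at hstep
    rw [hstep]
    exact ih (pvStepN x) (pvStepN_lt x)

-- ===== VERDICT (by name: the statement is the Claim_ definition above) =====
theorem generate_secret_number_spec : Claim_equal_generate_secret_number := by
  intro initial_secret steps _
  unfold Spec_generate_secret_number
  unfold generate_secret_number generate_secret_number_alt
  by_cases h : steps ≤ 0
  · rw [if_pos h]
    have hempty : PySem.List.pyRange 0 steps 1 = [] := by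
      simp [PySem.List.pyRange, show ¬ ((0:Int) < steps) by omega]
    rw [hempty]
    rfl
  · rw [if_neg h]
    have ht : steps = ((steps.toNat : Nat) : Int) := by omega
    set t : Nat := steps.toNat with htdef
    have hrange : PySem.List.pyRange 0 steps 1 = (List.range t).map (Nat.cast : Nat → Int) := by
      rw [ht]
      exact_mod_cast PySem.List.pyRange_zero_natCast t
    have hmod0 : PySem.Int.mod initial_secret 16777216
        = (((initial_secret % 16777216).toNat : Nat) : Int) := by
      rw [PySem.Int.mod_eq_emod_of_pos (by norm_num)]
      omega
    set n0 : Nat := (initial_secret % 16777216).toNat with hn0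
    have hn0lt : n0 < 16777216 := by omega
    -- A side
    rw [hrange, pvFoldConst]
    simp only [List.length_map, List.length_range]
    have htpos : 1 ≤ t := by omega
    obtain ⟨m, hm⟩ : ∃ m, t = m + 1 := ⟨t - 1, by omega⟩
    rw [hm, Function.iterate_succ_apply]
    have hmodn0 : (PySem.Int.mod initial_secret 16777216).toNat = n0 := by
      rw [PySem.Int.mod_eq_emod_of_pos (by norm_num)]
    rw [pvStepAeq initial_secret, hmodn0, pvAstepIter m (pvStepN n0) (pvStepN_lt n0)]
    -- B side
    rw [pvBaseConcrete, pvAccConcrete, ht, pvPowLoop_cast, hmod0, pvApply_cast']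
    have hrep := pvRep_powLoop t _ _ 1 0 pvRep_base pvRep_acc
    rw [hrep n0 hn0lt]
    have : 0 + t * 1 = m + 1 := by omega
    rw [this]
    rw [Function.iterate_succ_apply]
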